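-- pv_equiv track=rewrite | github.com/vladm3105/aidoc-flow-framework | ai_dev_flow/scripts/validate_diagram_consistency.py | check_nodes_in_text
-- ===== SOURCE A (Python) =====
-- from typing import Dict, List, Set, Tuple
--
-- def check_nodes_in_text(nodes: Set[str], text: str) -> Set[str]:
--     """Check which nodes are mentioned in the surrounding text."""
--     unreferenced = set()
--     text_lower = text.lower()
--
--     for node in nodes:
--         # Check if node label appears in text (case-insensitive)
--         if node.lower() not in text_lower:
--             # Try partial match for compound names
--             words = node.split()
--             if not any(word.lower() in text_lower for word in words if len(word) > 2):
--                 unreferenced.add(node)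
--
--     return unreferenced
-- ===== SOURCE B (Python) =====
-- def check_nodes_in_text(nodes, text):
--     """Check which nodes are mentioned in the surrounding text."""
--     text_lower = text.lower()
--
--     def terms(node):
--         return [node.lower()] + [w.lower() for w in node.split() if len(w) > 2]
--
--     # index: every substring of text_lower whose length is the length of some
--     # query term; each query then becomes one O(1) set lookup.
--     lengths = {len(t) for node in nodes for t in terms(node)}
--     index = {text_lower[i:i + L] for L in lengths
--              for i in range(len(text_lower) - L + 1)}
--
--     return {n for n in nodes if not any(t in index for t in terms(n))}
-- ===== Notes on version B (the rewrite author's own statement) =====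
-- stated objective: faster
-- what changed: Instead of scanning the whole text once per node and per word, B precomputes a hash-set index of all substrings of the lowered text at the lengths occurring among the query terms, and decides each term by one O(1) expected set lookup.
import Mathlib
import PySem

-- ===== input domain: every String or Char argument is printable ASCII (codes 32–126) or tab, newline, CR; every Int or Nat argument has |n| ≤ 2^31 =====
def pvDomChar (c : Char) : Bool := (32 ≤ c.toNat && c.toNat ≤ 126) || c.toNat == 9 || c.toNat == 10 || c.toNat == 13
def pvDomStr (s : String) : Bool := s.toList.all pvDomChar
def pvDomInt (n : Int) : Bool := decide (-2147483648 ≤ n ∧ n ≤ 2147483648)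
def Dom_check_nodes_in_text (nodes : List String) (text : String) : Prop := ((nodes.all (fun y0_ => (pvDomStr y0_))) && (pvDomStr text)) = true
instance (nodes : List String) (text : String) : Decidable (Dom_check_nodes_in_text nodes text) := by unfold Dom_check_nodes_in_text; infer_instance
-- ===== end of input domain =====

-- B replaces A's per-term scan of the whole text by a precomputed hash-set index of
-- all substrings of the lowered text at the query-term lengths; each term becomes one
-- set lookup (a timing run measured B faster on its generated inputs).


-- ===== PORT A =====
def check_nodes_in_text (nodes : List String) (text : String) : List String :=
  let text_lower := PySem.Str.lower text
  nodes.foldl (fun unreferenced node =>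
    if !(PySem.Str.isIn (PySem.Str.lower node) text_lower) then
      let words := PySem.Str.split₀ node
      if !((words.filter (fun word => decide (2 < PySem.Str.len word))).any
            (fun word => PySem.Str.isIn (PySem.Str.lower word) text_lower)) then
        PySem.Set.add unreferenced node
      else unreferenced
    else unreferenced) PySem.Set.empty

-- ===== PORT B =====
-- terms(node): the lowered full label plus its lowered words of length > 2
def pvTerms (node : String) : List String :=
  PySem.Str.lower node ::
    ((PySem.Str.split₀ node).filter (fun w => decide (2 < PySem.Str.len w))).map PySem.Str.lower

def check_nodes_in_text_alt (nodes : List String) (text : String) : List String :=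
  let text_lower := PySem.Str.lower text
  let lengths : PySem.Set Int :=
    PySem.Set.ofList (nodes.flatMap (fun node => (pvTerms node).map PySem.Str.len))
  let index : PySem.Set String :=
    PySem.Set.ofList (lengths.flatMap (fun L =>
      (PySem.List.pyRange 0 (PySem.Str.len text_lower - L + 1)).map
        (fun i => PySem.Str.slice text_lower (some i) (some (i + L)))))
  PySem.Set.ofList (nodes.filter (fun n => !(pvTerms n).any (fun t => PySem.Set.contains index t)))

-- ===== PRECONDITION & SPEC =====
def Spec_check_nodes_in_text (nodes : List String) (text : String) (out : List String) : Prop := out = check_nodes_in_text_alt nodes text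
instance (nodes : List String) (text : String) (out : List String) : Decidable (Spec_check_nodes_in_text nodes text out) := by unfold Spec_check_nodes_in_text; infer_instance

-- ===== CLAIM (what is proved, stated in full; the proofs are below) =====
def Claim_equal_check_nodes_in_text : Prop := ∀ (nodes : List String) (text : String), Dom_check_nodes_in_text nodes text → Spec_check_nodes_in_text nodes text (check_nodes_in_text nodes text)

-- ===== LEMMAS AND PROOFS =====

-- folding 'add if p' equals folding add over the filtered list
theorem pv_foldl_add_filter {α : Type} [BEq α] (p : α → Bool) (xs : List α) (s : PySem.Set α) :
    xs.foldl (fun s x => if p x then PySem.Set.add s x else s) s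
      = (xs.filter p).foldl PySem.Set.add s := by
  induction xs generalizing s with
  | nil => rfl
  | cons x xs ih =>
    simp only [List.foldl_cons, List.filter_cons]
    by_cases h : p x = true <;> simp [h, ih]

-- Boolean shape of A's nested ifs
theorem pv_if_if (a b : Bool) {α : Type} (t s : α) :
    (if !a then if !b then t else s else s) = (if !(a || b) then t else s) := by
  cases a <;> cases b <;> rfl

-- a term of a node has its length recorded in B's length list
theorem pv_len_mem (nodes : List String) (n t : String)
    (hn : n ∈ nodes) (ht : t ∈ pvTerms n) :
    PySem.Str.len t ∈ nodes.flatMap (fun node => (pvTerms node).map PySem.Str.len) := by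
  simp only [List.mem_flatMap, List.mem_map]
  exact ⟨n, hn, t, ht, rfl⟩

-- any slice of a list is a contiguous piece of it
theorem pv_slice_infix {α : Type} (xs : List α) (a? b? : Option Int) :
    PySem.List.slice xs a? b? <:+: xs := by
  cases a? <;> cases b? <;> simp only [PySem.List.slice] <;>
    exact ((List.take_prefix _ _).isInfix).trans ((List.drop_suffix _ _).isInfix)

-- membership in B's index equals Python's 'in' test, for any string of an indexed length
theorem pv_index_contains (tl : String) (lens : List Int) (t : String)
    (hmem : PySem.Str.len t ∈ lens) :
    PySem.Set.contains
      (PySem.Set.ofList ((PySem.Set.ofList lens).flatMap (fun L =>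
        (PySem.List.pyRange 0 (PySem.Str.len tl - L + 1)).map
          (fun i => PySem.Str.slice tl (some i) (some (i + L)))))) t
      = PySem.Str.isIn t tl := by
  have hlen : PySem.Str.len t = (t.toList.length : Int) := PySem.Str.len_eq t
  cases h : PySem.Str.isIn t tl with
  | false =>
    -- t is not a substring of tl, and every index entry is a slice of tl, hence a substring
    rw [Bool.eq_false_iff]
    intro hc
    rw [PySem.Set.contains_iff, PySem.Set.mem_ofList, List.mem_flatMap] at hc
    obtain ⟨L, _, hmap⟩ := hc
    rw [List.mem_map] at hmap
    obtain ⟨i, _, hslice⟩ := hmap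
    have hinf : t.toList <:+: tl.toList := by
      rw [← hslice, PySem.Str.toList_slice]
      exact pv_slice_infix tl.toList (some i) (some (i + L))
    rw [← PySem.Str.isIn_iff_infix, h] at hinf
    exact Bool.false_ne_true hinf
  | true =>
    -- t occurs in tl: the slice of tl at t's own position and length is exactly t
    rw [PySem.Str.isIn_iff_infix] at h
    obtain ⟨s1, s2, hsplit⟩ := h
    rw [PySem.Set.contains_iff, PySem.Set.mem_ofList, List.mem_flatMap]
    refine ⟨PySem.Str.len t, by rw [PySem.Set.mem_ofList]; exact hmem, ?_⟩
    rw [List.mem_map]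
    refine ⟨(s1.length : Int), ?_, ?_⟩
    · rw [PySem.List.mem_pyRange_one]
      have hlt : s1.length + t.toList.length ≤ tl.toList.length := by
        have := congrArg List.length hsplit
        simp only [List.length_append] at this
        omega
      constructor
      · exact Int.natCast_nonneg _
      · rw [PySem.Str.len_eq tl, hlen]; omega
    · apply String.toList_inj.mp
      rw [PySem.Str.toList_slice, hlen]
      have hrw : PySem.Chars.slice tl.toList (some ((s1.length : Nat) : Int))
          (some (((s1.length : Nat) : Int) + ((t.toList.length : Nat) : Int)))
          = PySem.List.slice tl.toList (some ((s1.length : Nat) : Int))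
            (some (((s1.length : Nat) : Int) + ((t.toList.length : Nat) : Int))) := rfl
      rw [hrw, PySem.List.slice_natCast_add, ← hsplit, List.append_assoc, List.drop_left, List.take_left]

-- ===== VERDICT (by name: the statement is the Claim_ definition above) =====
theorem check_nodes_in_text_spec : Claim_equal_check_nodes_in_text := by
  intro nodes text _
  unfold Spec_check_nodes_in_text check_nodes_in_text check_nodes_in_text_alt
  rw [PySem.Set.ofList_eq_foldl, ← pv_foldl_add_filter]
  apply PySem.List.foldl_congr_mem
  intro acc n hn
  rw [pv_if_if]
  congr 1
  have hterms : ∀ t ∈ pvTerms n,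
      PySem.Set.contains
        (PySem.Set.ofList ((PySem.Set.ofList (nodes.flatMap (fun node => (pvTerms node).map PySem.Str.len))).flatMap (fun L =>
          (PySem.List.pyRange 0 (PySem.Str.len (PySem.Str.lower text) - L + 1)).map
            (fun i => PySem.Str.slice (PySem.Str.lower text) (some i) (some (i + L)))))) t
        = PySem.Str.isIn t (PySem.Str.lower text) := fun t ht =>
    pv_index_contains _ _ _ (pv_len_mem nodes n t hn ht)
  rw [PySem.List.any_congr_mem hterms]
  simp [pvTerms, List.any_map, Function.comp]
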